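-- pv_equiv track=rewrite | github.com/elic121/Coding-Study | baekjoon/20056_마법사 상어와 파이어볼.py | condition2
-- ===== SOURCE A (Python) =====
-- def condition2(lst: list or tuple):
--     mass = 0
--     velo = 0
--     odd = 0
--     even = 0
--     for m, v, d in lst:
--         mass += m
--         velo += v
--         if d % 2 == 0:
--             even += 1
--         else:
--             odd += 1
--     if even == 0 or odd == 0:
--         dire = 'even'
--     else:
--         dire = 'odd'
--
--     return mass//5, velo//len(lst), dire
-- ===== SOURCE B (Python) =====
-- def condition2(lst: list or tuple):
--     mass, velo, _ = map(sum, zip(*lst))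
--     d0 = lst[0][2]
--     dire = 'even' if all((d - d0) % 2 == 0 for _, _, d in lst) else 'odd'
--     return mass // 5, velo // len(lst), dire
-- ===== Notes on version B (the rewrite author's own statement) =====
-- stated objective: alternative
-- what changed: B computes the column sums by transposing with zip(*lst) instead of an accumulator loop, and decides 'even'/'odd' by a homogeneity test relative to the first element's direction parity (all((d - d0) % 2 == 0)) instead of counting evens and odds.
import Mathlib
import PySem

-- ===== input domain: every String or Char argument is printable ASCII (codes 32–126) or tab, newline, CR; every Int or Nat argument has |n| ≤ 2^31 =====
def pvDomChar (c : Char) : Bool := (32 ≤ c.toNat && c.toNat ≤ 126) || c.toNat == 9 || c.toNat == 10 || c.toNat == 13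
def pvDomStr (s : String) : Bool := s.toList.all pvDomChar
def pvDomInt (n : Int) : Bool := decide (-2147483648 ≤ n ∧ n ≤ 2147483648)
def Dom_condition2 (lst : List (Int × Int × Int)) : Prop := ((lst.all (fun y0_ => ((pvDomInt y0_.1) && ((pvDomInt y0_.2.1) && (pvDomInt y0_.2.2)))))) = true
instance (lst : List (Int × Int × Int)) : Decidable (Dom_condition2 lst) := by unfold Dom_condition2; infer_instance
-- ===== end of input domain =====

-- B computes the column sums via a transpose (zip(*lst)) and decides 'even'/'odd' by a
-- homogeneity test against the first element's direction parity, instead of A's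
-- accumulator loop with even/odd counters (objective: alternative).


-- ===== PORT A =====
def condition2 (lst : List (Int × Int × Int)) : Int × Int × String :=
  let s : Int × Int × Int × Int :=
    lst.foldl (fun (st : Int × Int × Int × Int) t =>
      let mass := st.1 + t.1
      let velo := st.2.1 + t.2.1
      if PySem.Int.mod t.2.2 2 = 0 then (mass, velo, st.2.2.1, st.2.2.2 + 1)
      else (mass, velo, st.2.2.1 + 1, st.2.2.2)) (0, 0, 0, 0)
  let dire : String := if s.2.2.2 = 0 ∨ s.2.2.1 = 0 then "even" else "odd"
  (PySem.Int.floordiv s.1 5, PySem.Int.floordiv s.2.1 (lst.length : Int), dire)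

-- ===== PORT B =====
-- zip(*lst) transposes into the three columns; map(sum, ...) sums each column.
def condition2_alt (lst : List (Int × Int × Int)) : Int × Int × String :=
  let cols : List Int × List Int × List Int :=
    (lst.map (·.1), lst.map (·.2.1), lst.map (·.2.2))
  let mass : Int := cols.1.sum
  let velo : Int := cols.2.1.sum
  -- lst[0][2]; outside Pre_ (empty list) Python B raises, the port's default is never used
  let d0 : Int := ((PySem.List.pyGet? lst 0).getD (0, 0, 0)).2.2
  let dire : String :=
    if lst.all (fun t => PySem.Int.mod (t.2.2 - d0) 2 = 0) then "even" else "odd"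
  (PySem.Int.floordiv mass 5, PySem.Int.floordiv velo (lst.length : Int), dire)

-- ===== PRECONDITION & SPEC =====
-- Pre_ excludes the empty list, on which A raises ZeroDivisionError (velo // len(lst)).
def Pre_condition2 (lst : List (Int × Int × Int)) : Prop := lst ≠ []
instance (lst : List (Int × Int × Int)) : Decidable (Pre_condition2 lst) := by unfold Pre_condition2; infer_instance
def pvWitness_condition2 : (List (Int × Int × Int)) := [(3, 4, 2), (5, 6, 1)]

def Spec_condition2 (lst : List (Int × Int × Int)) (out : Int × Int × String) : Prop := out = condition2_alt lst
instance (lst : List (Int × Int × Int)) (out : Int × Int × String) : Decidable (Spec_condition2 lst out) := by unfold Spec_condition2; infer_instance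

-- ===== CLAIM (what is proved, stated in full; the proofs are below) =====
def Claim_equal_condition2 : Prop := ∀ (lst : List (Int × Int × Int)), Dom_condition2 lst → Pre_condition2 lst → Spec_condition2 lst (condition2 lst)

-- ===== LEMMAS AND PROOFS =====

-- A's loop, with accumulators generalized.
lemma condition2_foldl (lst : List (Int × Int × Int)) (m0 v0 o0 e0 : Int) :
    lst.foldl (fun (st : Int × Int × Int × Int) t =>
      let mass := st.1 + t.1
      let velo := st.2.1 + t.2.1
      if PySem.Int.mod t.2.2 2 = 0 then (mass, velo, st.2.2.1, st.2.2.2 + 1)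
      else (mass, velo, st.2.2.1 + 1, st.2.2.2)) (m0, v0, o0, e0)
    = (m0 + (lst.map (·.1)).sum,
       v0 + (lst.map (·.2.1)).sum,
       o0 + ((lst.filter (fun t => PySem.Int.mod t.2.2 2 ≠ 0)).length : Int),
       e0 + ((lst.filter (fun t => PySem.Int.mod t.2.2 2 = 0)).length : Int)) := by
  induction lst generalizing m0 v0 o0 e0 with
  | nil => simp
  | cons hd tl ih =>
    by_cases h : PySem.Int.mod hd.2.2 2 = 0 <;>
      simp only [List.foldl_cons, List.filter_cons, List.map_cons, List.sum_cons, h,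
        decide_true, decide_false, if_true, if_false, ne_eq, not_true_eq_false,
        not_false_eq_true, List.length_cons, ih, Prod.mk.injEq] <;>
      refine ⟨by ring, by ring, ?_, ?_⟩ <;> push_cast <;> ring

-- pointwise: two ints differ by an even amount iff their parities agree
lemma mod_sub_two (a b : Int) :
    PySem.Int.mod (a - b) 2 = 0 ↔ (PySem.Int.mod a 2 = 0 ↔ PySem.Int.mod b 2 = 0) := by
  simp only [PySem.Int.mod_eq_emod_of_pos (show (0:Int) < 2 by norm_num)]
  omega

-- key equivalence on a nonempty list: A's counter test vs B's homogeneity test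
lemma counters_iff_all (h : Int × Int × Int) (tl : List (Int × Int × Int)) :
    (((( h :: tl).filter (fun t => PySem.Int.mod t.2.2 2 = 0)).length : Int) = 0 ∨
     ((( h :: tl).filter (fun t => PySem.Int.mod t.2.2 2 ≠ 0)).length : Int) = 0)
    ↔ (h :: tl).all (fun t => PySem.Int.mod (t.2.2 - h.2.2) 2 = 0) := by
  have hz : ∀ (p : Int × Int × Int → Bool),
      ((((h :: tl).filter p).length : Int) = 0 ↔ ∀ t ∈ h :: tl, ¬ p t = true) := by
    intro p
    rw [show ((((h :: tl).filter p).length : Int) = 0 ↔ ((h :: tl).filter p).length = 0) by omega,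
        List.length_eq_zero_iff, List.filter_eq_nil_iff]
  rw [hz, hz, List.all_eq_true]
  simp only [decide_eq_true_eq, ne_eq, not_not]
  constructor
  · rintro (hodd | heven) t ht
    · -- every element is odd
      refine (mod_sub_two _ _).mpr ⟨fun hx => absurd hx (hodd t ht), fun hx => absurd hx (hodd h List.mem_cons_self)⟩
    · -- every element is even
      exact (mod_sub_two _ _).mpr ⟨fun _ => heven h List.mem_cons_self, fun _ => heven t ht⟩
  · intro hall
    by_cases hh : PySem.Int.mod h.2.2 2 = 0
    · right
      intro t ht
      exact ((mod_sub_two _ _).mp (hall t ht)).mpr hh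
    · left
      intro t ht hteq
      exact hh (((mod_sub_two _ _).mp (hall t ht)).mp hteq)

-- ===== VERDICT (by name: the statement is the Claim_ definition above) =====
theorem condition2_spec : Claim_equal_condition2 := by
  intro lst _ hpre
  unfold Spec_condition2 condition2 condition2_alt
  obtain ⟨h, tl, rfl⟩ := List.exists_cons_of_ne_nil hpre
  simp only [condition2_foldl, zero_add]
  have hd0 : ((PySem.List.pyGet? (h :: tl) 0).getD (0, 0, 0)).2.2 = h.2.2 := by
    simp [PySem.List.pyGet?, PySem.List.pyIdx?]
  rw [hd0]
  have hiff := counters_iff_all h tl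
  by_cases hc : (h :: tl).all (fun t => PySem.Int.mod (t.2.2 - h.2.2) 2 = 0)
  · rw [if_pos (hiff.mpr hc), if_pos hc]
  · rw [if_neg (fun hx => hc (hiff.mp hx)), if_neg hc]
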